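-- pv_equiv track=rewrite | github.com/20hajiyev/packet-tracer-skill | scripts/sample_catalog.py | infer_model_families
-- ===== SOURCE A (Python) =====
-- from typing import Any
--
-- def infer_model_families(item: dict[str, Any]) -> list[str]:
--     return sorted(
--         {
--             str(device.get("model", "")).strip()
--             for device in item.get("devices", [])
--             if str(device.get("model", "")).strip()
--         }
--     )
-- ===== SOURCE B (Python) =====
-- def _insert(xs, m):
--     # insert m into the sorted duplicate-free list xs, keeping it sorted and duplicate-free
--     if not xs:
--         return [m]
--     h = xs[0]
--     if m < h:
--         return [m] + xs
--     if m == h: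
--         return xs
--     return [h] + _insert(xs[1:], m)
--
-- def infer_model_families(item):
--     result = []
--     for device in item.get("devices", []):
--         m = str(device.get("model", "")).strip()
--         if m:
--             result = _insert(result, m)
--     return result
-- ===== Notes on version B (the rewrite author's own statement) =====
-- stated objective: alternative
-- what changed: B never builds a set and never calls sort: it maintains a sorted duplicate-free accumulator and places each non-empty stripped model name by ordered insertion (skipping it when already present), so the result is sorted-unique by invariant rather than by a final sort of a set.
import Mathlib
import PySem

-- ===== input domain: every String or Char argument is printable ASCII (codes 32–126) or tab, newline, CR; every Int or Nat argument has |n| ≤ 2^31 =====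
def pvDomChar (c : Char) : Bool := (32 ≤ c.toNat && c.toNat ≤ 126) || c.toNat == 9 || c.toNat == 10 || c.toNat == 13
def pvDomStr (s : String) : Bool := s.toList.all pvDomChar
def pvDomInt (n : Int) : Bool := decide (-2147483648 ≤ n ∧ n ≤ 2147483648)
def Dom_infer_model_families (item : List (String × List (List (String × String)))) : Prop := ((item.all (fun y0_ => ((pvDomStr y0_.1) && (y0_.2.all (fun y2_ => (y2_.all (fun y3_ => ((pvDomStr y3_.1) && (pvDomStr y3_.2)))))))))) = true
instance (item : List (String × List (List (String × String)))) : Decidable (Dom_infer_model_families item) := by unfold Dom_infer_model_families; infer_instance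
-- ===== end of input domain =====

-- B change (objective "alternative"): A builds a set of the stripped non-empty model names and
-- sorts it; B maintains a sorted duplicate-free accumulator and places each name by ordered
-- insertion (skipping names already present), with no set and no sort call.

-- ===== PORT A =====
-- sorted({str(device.get("model","")).strip() for device in item.get("devices",[]) if str(device.get("model","")).strip()})
def infer_model_families (item : List (String × List (List (String × String)))) : List String :=
  let devices := PySem.Dict.getD (PySem.Dict.mk item) "devices" []
  PySem.List.sorted
    (PySem.Set.ofList
      (devices.filterMap (fun device =>
        let m := PySem.Str.strip (PySem.Dict.getD (PySem.Dict.mk device) "model" "")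
        if m ≠ "" then some m else none)))
    (fun x => x) false

-- ===== PORT B =====
-- _insert: insert m into the sorted duplicate-free list xs, keeping it sorted and duplicate-free
def pvInsert : List String → String → List String
  | [], m => [m]
  | h :: t, m => if m < h then m :: h :: t else if m = h then h :: t else h :: pvInsert t m

def infer_model_families_alt (item : List (String × List (List (String × String)))) : List String :=
  (PySem.Dict.getD (PySem.Dict.mk item) "devices" []).foldl
    (fun acc device =>
      let m := PySem.Str.strip (PySem.Dict.getD (PySem.Dict.mk device) "model" "")
      if m ≠ "" then pvInsert acc m else acc) []

-- ===== PRECONDITION & SPEC =====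
def Spec_infer_model_families (item : List (String × List (List (String × String)))) (out : List String) : Prop := out = infer_model_families_alt item
instance (item : List (String × List (List (String × String)))) (out : List String) : Decidable (Spec_infer_model_families item out) := by unfold Spec_infer_model_families; infer_instance

-- ===== CLAIM (what is proved, stated in full; the proofs are below) =====
def Claim_equal_infer_model_families : Prop := ∀ (item : List (String × List (List (String × String)))), Dom_infer_model_families item → Spec_infer_model_families item (infer_model_families item)

-- ===== LEMMAS AND PROOFS =====

theorem pv_insert_mem : ∀ (xs : List String) (m a : String),
    a ∈ pvInsert xs m ↔ a = m ∨ a ∈ xs := by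
  intro xs
  induction xs with
  | nil => intro m a; simp [pvInsert]
  | cons h t ih =>
    intro m a
    by_cases h1 : m < h
    · simp [pvInsert, h1]
    · by_cases h2 : m = h
      · subst h2; simp [pvInsert]
      · simp [pvInsert, h1, h2, ih]; tauto

theorem pv_insert_pairwise : ∀ (xs : List String) (m : String),
    xs.Pairwise (· < ·) → (pvInsert xs m).Pairwise (· < ·) := by
  intro xs
  induction xs with
  | nil => intro m _; simp [pvInsert]
  | cons h t ih =>
    intro m hp
    have hht : ∀ y ∈ t, h < y := fun y hy => List.rel_of_pairwise_cons hp hy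
    have hpt : t.Pairwise (· < ·) := hp.of_cons
    by_cases h1 : m < h
    · rw [pvInsert, if_pos h1]
      refine List.pairwise_cons.mpr ⟨?_, hp⟩
      intro y hy
      rcases List.mem_cons.mp hy with rfl | hy
      · exact h1
      · exact lt_trans h1 (hht y hy)
    · by_cases h2 : m = h
      · rw [pvInsert, if_neg h1, if_pos h2]; exact hp
      · have hhm : h < m := lt_of_le_of_ne (le_of_not_gt h1) (Ne.symm h2)
        rw [pvInsert, if_neg h1, if_neg h2]
        refine List.pairwise_cons.mpr ⟨?_, ih m hpt⟩
        intro y hy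
        rcases (pv_insert_mem t m y).mp hy with rfl | hy
        · exact hhm
        · exact hht y hy

theorem pv_fold_insert : ∀ (ms : List String) (acc : List String),
    acc.Pairwise (· < ·) →
    (ms.foldl pvInsert acc).Pairwise (· < ·) ∧
    (∀ a, a ∈ ms.foldl pvInsert acc ↔ a ∈ acc ∨ a ∈ ms) := by
  intro ms
  induction ms with
  | nil => intro acc hp; simpa using hp
  | cons x xs ih =>
    intro acc hp
    obtain ⟨h1, h2⟩ := ih (pvInsert acc x) (pv_insert_pairwise acc x hp)
    refine ⟨h1, ?_⟩
    intro a
    rw [List.foldl_cons, h2 a, pv_insert_mem]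
    simp; tauto

-- B's loop equals folding pvInsert over the filterMap list A uses.
theorem pv_loop_eq (g : List (String × String) → Option String) :
    ∀ (l : List (List (String × String))) (acc : List String),
      l.foldl (fun acc d => match g d with | some m => pvInsert acc m | none => acc) acc
        = (l.filterMap g).foldl pvInsert acc := by
  intro l
  induction l with
  | nil => intro acc; simp
  | cons x xs ih =>
    intro acc
    cases h : g x <;> simp [List.foldl, h, ih]

-- the heart: sorted(set(ms)) = fold of ordered-unique insertion over ms
theorem pv_main (ms : List String) :
    PySem.List.sorted (PySem.Set.ofList ms) (fun x => x) false
      = ms.foldl pvInsert [] := by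
  obtain ⟨hpw, hmem⟩ := pv_fold_insert ms [] (by simp)
  have hnd1 : (ms.foldl pvInsert []).Nodup := hpw.imp ne_of_lt
  have hnd2 : (PySem.Set.ofList ms).Nodup := PySem.Set.nodup_ofList ms
  have hperm : (ms.foldl pvInsert []).Perm (PySem.Set.ofList ms) :=
    (List.perm_ext_iff_of_nodup hnd1 hnd2).mpr (by
      intro a; rw [hmem a, PySem.Set.mem_ofList]; simp)
  have := PySem.List.sorted_eq_of_perm_of_pairwise_lt (PySem.Set.ofList ms)
    (ms.foldl pvInsert []) (fun x => x) hperm (by simpa using hpw)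
  simpa using this

-- ===== VERDICT (by name: the statement is the Claim_ definition above) =====
theorem infer_model_families_spec : Claim_equal_infer_model_families := by
  intro item _
  unfold Spec_infer_model_families infer_model_families infer_model_families_alt
  simp only [ne_eq, ite_not]
  have hl := pv_loop_eq
    (fun device =>
      if PySem.Str.strip (PySem.Dict.getD (PySem.Dict.mk device) "model" "") = ""
      then none
      else some (PySem.Str.strip (PySem.Dict.getD (PySem.Dict.mk device) "model" "")))
    (PySem.Dict.getD (PySem.Dict.mk item) "devices" []) []
  simp only at hl
  rw [show (fun (acc : List String) device =>
        if PySem.Str.strip (PySem.Dict.getD (PySem.Dict.mk device) "model" "") = ""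
        then acc
        else pvInsert acc (PySem.Str.strip (PySem.Dict.getD (PySem.Dict.mk device) "model" "")))
      = (fun (acc : List String) d =>
          match (fun device =>
            if PySem.Str.strip (PySem.Dict.getD (PySem.Dict.mk device) "model" "") = ""
            then none
            else some (PySem.Str.strip (PySem.Dict.getD (PySem.Dict.mk device) "model" ""))) d with
          | some m => pvInsert acc m | none => acc) from by
    funext acc d
    by_cases h : PySem.Str.strip (PySem.Dict.getD (PySem.Dict.mk d) "model" "") = "" <;> simp [h]]
  rw [hl, pv_main]
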